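-- pv_equiv track=rewrite | github.com/bymars/topcoder | srm688/ParenthesesDiv2Hard.py | correct
-- ===== SOURCE A (Python) =====
-- def correct(s):
--     stack = 0
--     temp = 0
--     l = 0
--     r = 0
--     for i in range(len(s)):
--         if s[i] == '(':
--             temp = stack + 1
--         if s[i] == ')':
--             temp = stack - 1
--         if temp < 0:
--             s = s[:i]+'('+s[i+1:]
--             temp = stack + 1
--             l += 1
--         stack = temp
--     stack = 0
--     for i in range(len(s))[::-1]:
--         if s[i] == ')':
--             temp = stack + 1
--         if s[i] == '(':
--             temp = stack - 1
--         if temp < 0: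
--             s = s[:i]+')'+s[i+1:]
--             temp = stack + 1
--             r += 1
--         stack = temp
--     return [l, r]
-- ===== SOURCE B (Python) =====
-- def correct(s):
--     bal = 0
--     l = 0
--     for c in s:
--         if c == '(':
--             bal += 1
--         elif c == ')':
--             bal -= 1
--             if bal < 0:
--                 l += 1
--                 bal += 2
--     return [l, (bal + 1) // 2]
-- ===== Notes on version B (the rewrite author's own statement) =====
-- stated objective: faster
-- what changed: One integer-balance pass replaces A's two index loops with O(n) string-slice rebuilds on every fix-up; the whole right-to-left pass collapses to the closed form r = (bal + 1) // 2.
-- intended difference: On nonempty strings whose last character is not a parenthesis and whose balance after the left pass is positive, A returns r = 0 (its leftover temp variable from pass 1 makes pass 2 start with stack already equal to the full balance, so it counts no right-side fixes), while B returns the intended r = ceil(balance/2) needed to balance the string. — e.g. on correct("((a"): A returns [0, 0], B returns [0, 1]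
import Mathlib
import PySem

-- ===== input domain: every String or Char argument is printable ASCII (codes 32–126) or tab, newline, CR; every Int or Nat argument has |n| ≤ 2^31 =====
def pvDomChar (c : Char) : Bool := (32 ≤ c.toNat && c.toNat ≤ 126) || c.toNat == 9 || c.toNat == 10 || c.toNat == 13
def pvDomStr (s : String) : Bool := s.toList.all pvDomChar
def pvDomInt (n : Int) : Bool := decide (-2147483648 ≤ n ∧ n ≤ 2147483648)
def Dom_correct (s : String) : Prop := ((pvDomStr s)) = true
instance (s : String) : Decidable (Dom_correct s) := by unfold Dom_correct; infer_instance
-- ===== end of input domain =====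

-- B replaces A's two index loops (which rebuild the string by slicing at every fix-up) with one
-- integer-balance pass plus the closed form r = (bal + 1) // 2; on the inputs described at
-- D_correct below, A's leftover `temp` makes its second pass count nothing and B returns the
-- intended fix count.

-- ===== PORT A =====
def stepA1 (acc : List Char × Int × Int × Int) (i : Int) : List Char × Int × Int × Int :=
  let t := acc.1
  let stack := acc.2.1
  let temp := acc.2.2.1
  let l := acc.2.2.2
  let temp := if PySem.List.pyGetD t i ' ' = '(' then stack + 1 else temp
  let temp := if PySem.List.pyGetD t i ' ' = ')' then stack - 1 else temp
  if temp < 0 then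
    (PySem.List.slice t none (some i) ++ ['('] ++ PySem.List.slice t (some (i + 1)) none,
     stack + 1, stack + 1, l + 1)
  else (t, temp, temp, l)

def stepA2 (acc : List Char × Int × Int × Int) (i : Int) : List Char × Int × Int × Int :=
  let t := acc.1
  let stack := acc.2.1
  let temp := acc.2.2.1
  let r := acc.2.2.2
  let temp := if PySem.List.pyGetD t i ' ' = ')' then stack + 1 else temp
  let temp := if PySem.List.pyGetD t i ' ' = '(' then stack - 1 else temp
  if temp < 0 then
    (PySem.List.slice t none (some i) ++ [')'] ++ PySem.List.slice t (some (i + 1)) none,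
     stack + 1, stack + 1, r + 1)
  else (t, temp, temp, r)

def correct (s : String) : List Int :=
  let cs := s.toList
  let a1 := (PySem.List.pyRange 0 (cs.length : Int) 1).foldl stepA1 (cs, 0, 0, 0)
  let a2 := ((PySem.List.slice? (PySem.List.pyRange 0 (a1.1.length : Int) 1) none none (-1)).getD []).foldl
      stepA2 (a1.1, 0, a1.2.2.1, 0)
  [a1.2.2.2, a2.2.2.2]

-- ===== PORT B =====
def pvBStep (acc : Int × Int) (c : Char) : Int × Int :=
  if c = '(' then (acc.1 + 1, acc.2)
  else if c = ')' then
    (if acc.1 - 1 < 0 then (acc.1 + 1, acc.2 + 1) else (acc.1 - 1, acc.2))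
  else acc

def correct_alt (s : String) : List Int :=
  let p := s.toList.foldl pvBStep (0, 0)
  [p.2, PySem.Int.floordiv (p.1 + 1) 2]

-- ===== PRECONDITION & SPEC =====
-- helpers for the difference region (closed-form conditions on the INPUT only)
def pvBal (cs : List Char) : Int :=
  ((cs.countP (fun c => c = '(')) : Int) - ((cs.countP (fun c => c = ')')) : Int)

-- running prefix balance and its minimum, in one left fold (cheap to decide on large inputs)
def pvScan (cs : List Char) : Int × Int :=
  cs.foldl (fun pm c => (pm.1 + pvBal [c], min pm.2 (pm.1 + pvBal [c]))) (0, 0)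

-- minimum over all prefix balances of the input (the empty prefix included, so <= 0)
def pvMP (cs : List Char) : Int := (pvScan cs).2

-- paren excess left over after fixing every prefix violation from the left
def pvT (cs : List Char) : Int := pvBal cs + 2 * PySem.Int.floordiv (1 - pvMP cs) 2

def pvIsParen (c : Char) : Bool := c = '(' || c = ')'

def pvLastParen (cs : List Char) : Bool := ((cs.map pvIsParen).getLast?).getD false

-- On nonempty strings whose last character is not a parenthesis and whose left-pass balance is
-- positive, A returns r = 0 (its leftover `temp` from pass 1 makes pass 2 start with stack already
-- at the full balance, so it counts no right-side fixes), while B returns the intended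
-- r = ceil(balance/2) needed to balance the string.
def D_correct (s : String) : Prop :=
  s.toList ≠ [] ∧ pvLastParen s.toList = false ∧ 1 ≤ pvT s.toList
instance (s : String) : Decidable (D_correct s) := by unfold D_correct; infer_instance

def Spec_correct (s : String) (out : List Int) : Prop := ¬ D_correct s → out = correct_alt s
instance (s : String) (out : List Int) : Decidable (Spec_correct s out) := by
  unfold Spec_correct; infer_instance

def pvDiffWitness_correct : String := "((a"
def pvDiffWitnessOut_correct : (List Int) × (List Int) := ([0, 0], [0, 1])

-- ===== CLAIM (what is proved, stated in full; the proofs are below) =====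
def Claim_unchanged_correct : Prop := ∀ (s : String), Dom_correct s → Spec_correct s (correct s)
def Claim_changed_correct : Prop :=
  Dom_correct (pvDiffWitness_correct) ∧ D_correct (pvDiffWitness_correct) ∧
  correct (pvDiffWitness_correct) = pvDiffWitnessOut_correct.1 ∧
  correct_alt (pvDiffWitness_correct) = pvDiffWitnessOut_correct.2 ∧
  pvDiffWitnessOut_correct.1 ≠ pvDiffWitnessOut_correct.2
def Claim_exact_correct : Prop :=
  ∀ (s : String), Dom_correct s → D_correct s → correct s ≠ correct_alt s

-- ===== LEMMAS AND PROOFS =====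
-- per-char value and prefix-sum views of pvBal/pvMPs, used by the proofs only
def pvVal (c : Char) : Int := if c = '(' then 1 else if c = ')' then -1 else 0

def pvVsum : List Char → Int
  | [] => 0
  | c :: cs => pvVal c + pvVsum cs

theorem pvBal_single (c : Char) : pvBal [c] = pvVal c := by
  obtain hp | hp | hp : c = '(' ∨ c = ')' ∨ (c ≠ '(' ∧ c ≠ ')') := by tauto
  · subst hp; simp [pvBal, pvVal]
  · subst hp; simp [pvBal, pvVal]
  · simp [pvBal, pvVal, hp.1, hp.2]

def pvMPs : List Char → Int
  | [] => 0
  | c :: cs => min 0 (pvVal c + pvMPs cs)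

theorem pvMPs_cons (c : Char) (cs : List Char) :
    pvMPs (c :: cs) = min 0 (pvVal c + pvMPs cs) := by
  rw [pvMPs]

theorem pvMPs_nonpos (cs : List Char) : pvMPs cs ≤ 0 := by
  cases cs <;> simp [pvMPs]

theorem pvScan_go (cs : List Char) : ∀ (p m : Int), m ≤ p →
    cs.foldl (fun pm c => (pm.1 + pvBal [c], min pm.2 (pm.1 + pvBal [c]))) (p, m)
      = (p + pvVsum cs, min m (p + pvMPs cs)) := by
  induction cs with
  | nil => intro p m h; simp [pvVsum, pvMPs]; omega
  | cons c cs ih =>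
    intro p m h
    have hmp := pvMPs_nonpos cs
    rw [List.foldl_cons]
    have := ih (p + pvBal [c]) (min m (p + pvBal [c])) (by omega)
    rw [this, pvBal_single, pvVsum, pvMPs_cons]
    rw [Prod.mk.injEq]
    exact ⟨by ring, by omega⟩

theorem pvMP_eq (cs : List Char) : pvMP cs = pvMPs cs := by
  have h := pvScan_go cs 0 0 le_rfl
  have hmp := pvMPs_nonpos cs
  simp only [pvMP, pvScan, h]
  omega

theorem pvVsum_eq (cs : List Char) : pvVsum cs = pvBal cs := by
  induction cs with
  | nil => simp [pvVsum, pvBal]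
  | cons c cs ih =>
    have : pvBal (c :: cs) = pvVal c + pvBal cs := by
      rw [← pvBal_single]
      simp only [pvBal, List.countP_cons, List.countP_nil]
      push_cast
      ring
    rw [pvVsum, ih, this]

-- clean structural models of A's two passes, and the arithmetic behind them
def p1 : List Char → Int → Int → List Char × Int × Int
  | [], st, l => ([], st, l)
  | c :: cs, st, l =>
    let t := if c = '(' then st + 1 else if c = ')' then st - 1 else st
    if t < 0 then
      let q := p1 cs (st + 1) (l + 1)
      ('(' :: q.1, q.2.1, q.2.2)
    else
      let q := p1 cs t l
      (c :: q.1, q.2.1, q.2.2)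

def step1c (c : Char) (st l : Int) : Char × Int × Int :=
  let t2 := if c = ')' then st - 1 else if c = '(' then st + 1 else st
  if t2 < 0 then ('(', st + 1, l + 1) else (c, t2, l)

def step2 (c : Char) (st t r : Int) : Char × Int × Int × Int :=
  let t1 := if c = '(' then st - 1 else if c = ')' then st + 1 else t
  if t1 < 0 then (')', st + 1, st + 1, r + 1) else (c, t1, t1, r)

def p2q : List Char → Int → Int → Int → List Char × Int × Int × Int
  | [], st, t, r => ([], st, t, r)
  | c :: cs, st, t, r =>
    let q := p2q cs st t r
    let z := step2 c q.2.1 q.2.2.1 q.2.2.2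
    (z.1 :: q.1, z.2.1, z.2.2.1, z.2.2.2)

def pvM : List Char → Int
  | [] => 0
  | c :: cs => max (pvVal c + pvVsum cs) (pvM cs)

theorem half_bounds (x : Int) :
    2 * PySem.Int.floordiv x 2 ≤ x ∧ x < 2 * PySem.Int.floordiv x 2 + 2 := by
  have h := PySem.Int.floordiv_mul_add_mod x 2
  have h1 := PySem.Int.mod_nonneg x (b := 2) (by norm_num)
  have h2 := PySem.Int.mod_lt x (b := 2) (by norm_num)
  omega

theorem pvM_ge (cs : List Char) : pvVsum cs ≤ pvM cs ∧ 0 ≤ pvM cs := by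
  induction cs with
  | nil => simp [pvVsum, pvM]
  | cons c cs ih => simp [pvVsum, pvM]; omega

theorem pvM_eq (cs : List Char) : pvM cs = pvVsum cs - pvMPs cs := by
  induction cs with
  | nil => simp [pvVsum, pvM, pvMPs]
  | cons c cs ih => simp [pvVsum, pvM, pvMPs_cons, ih]; omega

theorem lastParen_cons (c : Char) (cs : List Char) (h : cs ≠ []) :
    pvLastParen (c :: cs) = pvLastParen cs := by
  cases cs with
  | nil => exact absurd rfl h
  | cons d ds => simp [pvLastParen]

theorem p1_bfold (cs : List Char) : ∀ (st l : Int), 0 ≤ st →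
    cs.foldl pvBStep (st, l) = ((p1 cs st l).2.1, (p1 cs st l).2.2) := by
  induction cs with
  | nil => intro st l h; simp [p1]
  | cons c cs ih =>
    intro st l h
    obtain hp | hp | hp : c = '(' ∨ c = ')' ∨ (c ≠ '(' ∧ c ≠ ')') := by tauto
    · subst hp; simp only [List.foldl_cons, p1, pvBStep]
      simp only [Char.reduceEq, reduceIte]
      rw [if_neg (by omega : ¬ st + 1 < 0)]
      dsimp only; exact ih (st + 1) l (by omega)
    · subst hp; simp only [List.foldl_cons, p1, pvBStep]
      simp only [Char.reduceEq, reduceIte]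
      split_ifs with hf <;> dsimp only
      · exact ih (st + 1) (l + 1) (by omega)
      · exact ih (st - 1) l (by omega)
    · simp only [List.foldl_cons, p1, pvBStep, if_neg hp.1, if_neg hp.2]
      rw [if_neg (by omega : ¬ st < 0)]
      dsimp only; exact ih st l (by omega)

theorem p1_l (cs : List Char) : ∀ (st l : Int), 0 ≤ st →
    max (-(st + pvMPs cs)) 0 ≤ 2 * ((p1 cs st l).2.2 - l) ∧
    2 * ((p1 cs st l).2.2 - l) ≤ max (-(st + pvMPs cs)) 0 + 1 := by
  induction cs with
  | nil => intro st l h; simp [p1, pvMPs]; omega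
  | cons c cs ih =>
    intro st l h
    have hmp := pvMPs_nonpos cs
    obtain hp | hp | hp : c = '(' ∨ c = ')' ∨ (c ≠ '(' ∧ c ≠ ')') := by tauto
    · subst hp
      simp only [p1, pvMPs_cons, pvVal, Char.reduceEq, reduceIte]
      rw [if_neg (by omega : ¬ st + 1 < 0)]
      have := ih (st + 1) l (by omega); dsimp only; omega
    · subst hp
      simp only [p1, pvMPs_cons, pvVal, Char.reduceEq, reduceIte]
      split_ifs with hf <;> dsimp only
      · have := ih (st + 1) (l + 1) (by omega); omega
      · have := ih (st - 1) l (by omega); omega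
    · simp only [p1, pvMPs_cons, pvVal, if_neg hp.1, if_neg hp.2]
      rw [if_neg (by omega : ¬ st < 0)]
      have := ih st l (by omega); dsimp only; omega

theorem p1_st (cs : List Char) : ∀ (st l : Int), 0 ≤ st →
    (p1 cs st l).2.1 = st + pvVsum cs + 2 * ((p1 cs st l).2.2 - l) := by
  induction cs with
  | nil => intro st l h; simp [p1, pvVsum]
  | cons c cs ih =>
    intro st l h
    obtain hp | hp | hp : c = '(' ∨ c = ')' ∨ (c ≠ '(' ∧ c ≠ ')') := by tauto
    · subst hp
      simp only [p1, pvVsum, pvVal, Char.reduceEq, reduceIte]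
      rw [if_neg (by omega : ¬ st + 1 < 0)]
      have := ih (st + 1) l (by omega); dsimp only; omega
    · subst hp
      simp only [p1, pvVsum, pvVal, Char.reduceEq, reduceIte]
      split_ifs with hf <;> dsimp only
      · have := ih (st + 1) (l + 1) (by omega); omega
      · have := ih (st - 1) l (by omega); omega
    · simp only [p1, pvVsum, pvVal, if_neg hp.1, if_neg hp.2]
      rw [if_neg (by omega : ¬ st < 0)]
      have := ih st l (by omega); dsimp only; omega

theorem p1_vsum (cs : List Char) : ∀ (st l : Int),
    pvVsum (p1 cs st l).1 = (p1 cs st l).2.1 - st := by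
  induction cs with
  | nil => intro st l; simp [p1, pvVsum]
  | cons c cs ih =>
    intro st l
    obtain hp | hp | hp : c = '(' ∨ c = ')' ∨ (c ≠ '(' ∧ c ≠ ')') := by tauto
    · subst hp
      simp only [p1, Char.reduceEq, reduceIte]
      split_ifs with hf <;> dsimp only <;>
        simp only [pvVsum, pvVal, Char.reduceEq, reduceIte]
      · have := ih (st + 1) (l + 1); omega
      · have := ih (st + 1) l; omega
    · subst hp
      simp only [p1, Char.reduceEq, reduceIte]
      split_ifs with hf <;> dsimp only <;>
        simp only [pvVsum, pvVal, Char.reduceEq, reduceIte]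
      · have := ih (st + 1) (l + 1); omega
      · have := ih (st - 1) l; omega
    · simp only [p1, if_neg hp.1, if_neg hp.2]
      split_ifs with hf <;> dsimp only <;>
        simp only [pvVsum, pvVal, Char.reduceEq, reduceIte, if_neg hp.1, if_neg hp.2]
      · have := ih (st + 1) (l + 1); omega
      · have := ih st l; omega

theorem p1_mp (cs : List Char) : ∀ (st l : Int), 0 ≤ st →
    -st ≤ pvMPs (p1 cs st l).1 := by
  induction cs with
  | nil => intro st l h; simp [p1, pvMPs]; omega
  | cons c cs ih =>
    intro st l h
    obtain hp | hp | hp : c = '(' ∨ c = ')' ∨ (c ≠ '(' ∧ c ≠ ')') := by tauto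
    · subst hp
      simp only [p1, Char.reduceEq, reduceIte]
      rw [if_neg (by omega : ¬ st + 1 < 0)]
      have := ih (st + 1) l (by omega); dsimp only
      simp only [pvMPs_cons, pvVal, Char.reduceEq, reduceIte]
      omega
    · subst hp
      simp only [p1, Char.reduceEq, reduceIte]
      split_ifs with hf <;> dsimp only <;>
        simp only [pvMPs_cons, pvVal, Char.reduceEq, reduceIte]
      · have := ih (st + 1) (l + 1) (by omega); omega
      · have := ih (st - 1) l (by omega); omega
    · simp only [p1, if_neg hp.1, if_neg hp.2]
      rw [if_neg (by omega : ¬ st < 0)]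
      have := ih st l (by omega); dsimp only
      simp only [pvMPs_cons, pvVal, Char.reduceEq, reduceIte, if_neg hp.1, if_neg hp.2]
      omega

theorem p1_map (cs : List Char) : ∀ (st l : Int), 0 ≤ st →
    ((p1 cs st l).1).map pvIsParen = cs.map pvIsParen := by
  induction cs with
  | nil => intro st l h; simp [p1]
  | cons c cs ih =>
    intro st l h
    obtain hp | hp | hp : c = '(' ∨ c = ')' ∨ (c ≠ '(' ∧ c ≠ ')') := by tauto
    · subst hp
      simp only [p1, Char.reduceEq, reduceIte]
      rw [if_neg (by omega : ¬ st + 1 < 0)]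
      dsimp only; simp [ih _ _ (by omega : (0:Int) ≤ st + 1)]
    · subst hp
      simp only [p1, Char.reduceEq, reduceIte]
      split_ifs with hf <;> dsimp only
      · simp [ih _ _ (by omega : (0:Int) ≤ st + 1), pvIsParen]
      · simp [ih _ _ (by omega : (0:Int) ≤ st - 1)]
    · simp only [p1, if_neg hp.1, if_neg hp.2]
      rw [if_neg (by omega : ¬ st < 0)]
      dsimp only; simp [ih _ _ h]

theorem lastParen_p1 (cs : List Char) (st l : Int) (h : 0 ≤ st) :
    pvLastParen (p1 cs st l).1 = pvLastParen cs := by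
  simp only [pvLastParen, p1_map cs st l h]

theorem p2q_spec (cs : List Char) (t0 : Int) (h0 : 0 ≤ t0) : cs ≠ [] →
    (p2q cs 0 t0 0).2.1
        = (if pvLastParen cs then 0 else t0) - pvVsum cs + 2 * (p2q cs 0 t0 0).2.2.2 ∧
    (p2q cs 0 t0 0).2.2.1 = (p2q cs 0 t0 0).2.1 ∧
    max (pvM cs - (if pvLastParen cs then 0 else t0)) 0 ≤ 2 * (p2q cs 0 t0 0).2.2.2 ∧
    2 * (p2q cs 0 t0 0).2.2.2 ≤ max (pvM cs - (if pvLastParen cs then 0 else t0)) 0 + 1 := by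
  induction cs with
  | nil => intro h; exact absurd rfl h
  | cons c cs ih =>
    intro _
    by_cases hcs : cs = []
    · subst hcs
      obtain hp | hp | hp : c = '(' ∨ c = ')' ∨ (c ≠ '(' ∧ c ≠ ')') := by tauto
      · subst hp
        have e : p2q ['('] 0 t0 0 = ([')'], 1, 1, 1) := by
          simp [p2q, step2]
        rw [e]
        simp [pvLastParen, pvIsParen, pvM, pvVsum, pvVal]
      · subst hp
        have e : p2q [')'] 0 t0 0 = ([')'], 1, 1, 0) := by
          simp [p2q, step2]
        rw [e]
        simp [pvLastParen, pvIsParen, pvM, pvVsum, pvVal]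
      · have e : p2q [c] 0 t0 0 = ([c], t0, t0, 0) := by
          simp only [p2q, step2, if_neg hp.1, if_neg hp.2]
          rw [if_neg (by omega : ¬ t0 < 0)]
        rw [e]
        have hb : pvLastParen [c] = false := by
          simp [pvLastParen, pvIsParen, hp.1, hp.2]
        rw [hb]
        simp only [pvM, pvVsum, pvVal, if_neg hp.1, if_neg hp.2, Bool.false_eq_true, if_false]
        exact ⟨by omega, trivial, by omega, by omega⟩
    · have hlp := lastParen_cons c cs hcs
      have hM := pvM_ge cs
      have IH := ih hcs
      rw [hlp]
      simp only [p2q, pvM, pvVsum]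
      set q := p2q cs 0 t0 0 with hq
      obtain ⟨h1, h2, h3, h4⟩ := IH
      simp only [step2]
      rcases Bool.eq_false_or_eq_true (pvLastParen cs) with hb | hb <;>
        simp only [hb, Bool.false_eq_true, reduceIte] at h1 h3 h4 ⊢ <;>
        obtain hp | hp | hp : c = '(' ∨ c = ')' ∨ (c ≠ '(' ∧ c ≠ ')') := by tauto
      all_goals first
        | (subst hp
           simp only [pvVal, Char.reduceEq, reduceIte]
           split_ifs with hf <;> dsimp only <;> omega)
        | (simp only [pvVal, if_neg hp.1, if_neg hp.2]
           rw [h2, if_neg (by omega : ¬ q.2.1 < 0)]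
           dsimp only; omega)

theorem getD_mid (pre rest : List Char) (c d : Char) :
    (pre ++ c :: rest).getD pre.length d = c := by
  simp [List.getD, List.getElem?_append_right (Nat.le_refl pre.length)]

theorem take_mid (pre rest : List Char) (c : Char) :
    (pre ++ c :: rest).take pre.length = pre := by
  simpa using List.take_left pre (c :: rest)

theorem drop_mid (pre rest : List Char) (c : Char) :
    (pre ++ c :: rest).drop (pre.length + 1) = rest := by
  have : pre ++ c :: rest = (pre ++ [c]) ++ rest := by simp
  rw [this]
  simpa using List.drop_left (pre ++ [c]) rest

theorem stepA1_eq (pre rest : List Char) (c : Char) (st l : Int) :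
    stepA1 (pre ++ c :: rest, st, st, l) (pre.length : Int) =
      (pre ++ (step1c c st l).1 :: rest, (step1c c st l).2.1, (step1c c st l).2.1,
       (step1c c st l).2.2) := by
  simp only [stepA1, step1c, PySem.List.pyGetD_natCast, getD_mid]
  have h1 : PySem.List.slice (pre ++ c :: rest) none (some (pre.length : Int)) = pre := by
    rw [PySem.List.slice_to_natCast, take_mid]
  have h2 : PySem.List.slice (pre ++ c :: rest) (some ((pre.length : Int) + 1)) none = rest := by
    have : ((pre.length : Int) + 1) = ((pre.length + 1 : Nat) : Int) := by push_cast; ring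
    rw [this, PySem.List.slice_from_natCast, drop_mid]
  rw [h1, h2]
  split_ifs with hf <;> simp

theorem stepA2_eq (pre rest : List Char) (c : Char) (st t r : Int) :
    stepA2 (pre ++ c :: rest, st, t, r) (pre.length : Int) =
      (pre ++ (step2 c st t r).1 :: rest, (step2 c st t r).2.1, (step2 c st t r).2.2.1,
       (step2 c st t r).2.2.2) := by
  simp only [stepA2, step2, PySem.List.pyGetD_natCast, getD_mid]
  have h1 : PySem.List.slice (pre ++ c :: rest) none (some (pre.length : Int)) = pre := by
    rw [PySem.List.slice_to_natCast, take_mid]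
  have h2 : PySem.List.slice (pre ++ c :: rest) (some ((pre.length : Int) + 1)) none = rest := by
    have : ((pre.length : Int) + 1) = ((pre.length + 1 : Nat) : Int) := by push_cast; ring
    rw [this, PySem.List.slice_from_natCast, drop_mid]
  rw [h1, h2]
  split_ifs with hf <;> simp

theorem p1_cons (c : Char) (cs : List Char) (st l : Int) :
    p1 (c :: cs) st l =
      ((step1c c st l).1 :: (p1 cs (step1c c st l).2.1 (step1c c st l).2.2).1,
       (p1 cs (step1c c st l).2.1 (step1c c st l).2.2).2.1,
       (p1 cs (step1c c st l).2.1 (step1c c st l).2.2).2.2) := by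
  obtain hp | hp | hp : c = '(' ∨ c = ')' ∨ (c ≠ '(' ∧ c ≠ ')') := by tauto
  · subst hp
    simp only [p1, step1c, Char.reduceEq, reduceIte]
    split_ifs with hf <;> rfl
  · subst hp
    simp only [p1, step1c, Char.reduceEq, reduceIte]
    split_ifs with hf <;> rfl
  · simp only [p1, step1c, if_neg hp.1, if_neg hp.2]
    split_ifs with hf <;> rfl

theorem loop1_eq (cs : List Char) : ∀ (pre : List Char) (st l : Int),
    (PySem.List.pyRange (pre.length : Int) ((pre.length : Int) + (cs.length : Int)) 1).foldl
        stepA1 (pre ++ cs, st, st, l)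
      = (pre ++ (p1 cs st l).1, (p1 cs st l).2.1, (p1 cs st l).2.1, (p1 cs st l).2.2) := by
  induction cs with
  | nil =>
    intro pre st l
    rw [PySem.List.pyRange_one_eq_nil (by simp)]
    simp [p1]
  | cons c cs ih =>
    intro pre st l
    rw [PySem.List.pyRange_one_cons (by push_cast [List.length_cons]; omega)]
    rw [List.foldl_cons, stepA1_eq, p1_cons]
    have hlen : ((pre.length : Int) + 1) = (((pre ++ [(step1c c st l).1]).length : Nat) : Int) := by
      push_cast; simp
    have hend : (pre.length : Int) + ((c :: cs).length : Int)
        = (((pre ++ [(step1c c st l).1]).length : Nat) : Int) + (cs.length : Int) := by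
      push_cast; simp; ring
    rw [hlen, hend]
    have hstr : pre ++ (step1c c st l).1 :: cs = (pre ++ [(step1c c st l).1]) ++ cs := by simp
    rw [hstr, ih]
    simp

theorem p2q_append (cs : List Char) (c : Char) : ∀ (st t r : Int),
    p2q (cs ++ [c]) st t r =
      ((p2q cs (step2 c st t r).2.1 (step2 c st t r).2.2.1 (step2 c st t r).2.2.2).1
          ++ [(step2 c st t r).1],
       (p2q cs (step2 c st t r).2.1 (step2 c st t r).2.2.1 (step2 c st t r).2.2.2).2.1,
       (p2q cs (step2 c st t r).2.1 (step2 c st t r).2.2.1 (step2 c st t r).2.2.2).2.2.1,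
       (p2q cs (step2 c st t r).2.1 (step2 c st t r).2.2.1 (step2 c st t r).2.2.2).2.2.2) := by
  induction cs with
  | nil => intro st t r; simp [p2q]
  | cons d cs ih =>
    intro st t r
    simp only [List.cons_append, p2q, ih]

theorem loop2_eq (pre : List Char) : ∀ (post : List Char) (st t r : Int),
    ((PySem.List.pyRange 0 (pre.length : Int) 1).reverse).foldl stepA2 (pre ++ post, st, t, r)
      = ((p2q pre st t r).1 ++ post, (p2q pre st t r).2.1,
         (p2q pre st t r).2.2.1, (p2q pre st t r).2.2.2) := by
  induction pre using List.reverseRecOn with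
  | nil =>
    intro post st t r
    rw [PySem.List.pyRange_one_eq_nil (by simp)]
    simp [p2q]
  | append_singleton l a ih =>
    intro post st t r
    have hlen : (((l ++ [a]).length : Nat) : Int) = (l.length : Int) + 1 := by push_cast; simp
    rw [hlen, PySem.List.pyRange_one_succ_right (by positivity)]
    rw [List.reverse_append]
    simp only [List.reverse_cons, List.reverse_nil, List.nil_append, List.singleton_append,
      List.foldl_cons]
    have hstr : (l ++ [a]) ++ post = l ++ a :: post := by simp
    rw [hstr, stepA2_eq, ih, p2q_append]
    simp

theorem correct_eq (s : String) :
    correct s = [(p1 s.toList 0 0).2.2,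
                 (p2q (p1 s.toList 0 0).1 0 (p1 s.toList 0 0).2.1 0).2.2.2] := by
  have hA : (PySem.List.pyRange 0 (s.toList.length : Int) 1).foldl stepA1 (s.toList, 0, 0, 0)
      = ((p1 s.toList 0 0).1, (p1 s.toList 0 0).2.1, (p1 s.toList 0 0).2.1,
         (p1 s.toList 0 0).2.2) := by
    simpa using loop1_eq s.toList [] 0 0
  have hB : ∀ (o : List Char) (t0 : Int),
      ((PySem.List.slice? (PySem.List.pyRange 0 (o.length : Int) 1) none none (-1)).getD []).foldl
          stepA2 (o, 0, t0, 0)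
      = ((p2q o 0 t0 0).1, (p2q o 0 t0 0).2.1, (p2q o 0 t0 0).2.2.1, (p2q o 0 t0 0).2.2.2) := by
    intro o t0
    rw [PySem.List.slice?_none_none_neg_one]
    simpa using loop2_eq o [] 0 t0 0
  simp only [correct]
  rw [hA]
  dsimp only
  rw [hB]

theorem correct_alt_eq (s : String) :
    correct_alt s = [(p1 s.toList 0 0).2.2,
                     PySem.Int.floordiv ((p1 s.toList 0 0).2.1 + 1) 2] := by
  simp only [correct_alt]
  rw [p1_bfold s.toList 0 0 le_rfl]

theorem main_core (s : String) :
    (¬ D_correct s → correct s = correct_alt s) ∧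
    (D_correct s → correct s ≠ correct_alt s) := by
  rw [correct_eq, correct_alt_eq]
  by_cases hcs : s.toList = []
  · rw [hcs]
    have h1 := half_bounds ((0:Int) + 1)
    constructor
    · intro _
      simp only [p1, p2q]
      have : PySem.Int.floordiv (0 + 1) 2 = 0 := by omega
      rw [this]
    · intro hD
      exact absurd hcs hD.1
  · -- notation
    have hT := p1_st s.toList 0 0 le_rfl
    have hl := p1_l s.toList 0 0 le_rfl
    have hvs := p1_vsum s.toList 0 0
    have hmpo := p1_mp s.toList 0 0 le_rfl
    have hmpo' := pvMPs_nonpos (p1 s.toList 0 0).1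
    have hmp := pvMPs_nonpos s.toList
    have hMo := pvM_eq (p1 s.toList 0 0).1
    have hMg := pvM_ge (p1 s.toList 0 0).1
    have hlp := lastParen_p1 s.toList 0 0 le_rfl
    have ho : (p1 s.toList 0 0).1 ≠ [] := by
      intro h
      have := p1_map s.toList 0 0 le_rfl
      rw [h] at this
      have h2 : List.map pvIsParen s.toList = [] := by
        rw [← this, List.map_nil]
      exact hcs (List.map_eq_nil_iff.mp h2)
    have hT0 : 0 ≤ (p1 s.toList 0 0).2.1 := by omega
    obtain ⟨h1, h2, h3, h4⟩ := p2q_spec (p1 s.toList 0 0).1 (p1 s.toList 0 0).2.1 hT0 ho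
    rw [hlp] at h1 h3 h4
    have hMoT : pvM (p1 s.toList 0 0).1 = (p1 s.toList 0 0).2.1 := by omega
    rw [hMoT] at h3 h4
    have hbr := half_bounds ((p1 s.toList 0 0).2.1 + 1)
    have hbk := half_bounds (1 - pvMPs s.toList)
    have hbal := pvVsum_eq s.toList
    have hTval : (p1 s.toList 0 0).2.1 = pvT s.toList := by
      simp only [pvT, pvMP_eq]; omega
    rcases Bool.eq_false_or_eq_true (pvLastParen s.toList) with hb | hb
    · -- last char is a paren: no difference
      rw [hb] at h1 h3 h4
      simp only [if_true] at h1 h3 h4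
      constructor
      · intro _
        have : (p2q (p1 s.toList 0 0).1 0 (p1 s.toList 0 0).2.1 0).2.2.2
            = PySem.Int.floordiv ((p1 s.toList 0 0).2.1 + 1) 2 := by omega
        rw [this]
      · intro hD
        rw [hD.2.1] at hb
        exact absurd hb (by simp)
    · -- last char not a paren: A's pass 2 counts nothing
      rw [hb] at h1 h3 h4
      simp only [Bool.false_eq_true, if_false] at h1 h3 h4
      constructor
      · intro hnD
        have hTle : pvT s.toList ≤ 0 := by
          by_contra hgt
          exact hnD ⟨hcs, hb, by omega⟩
        have : (p2q (p1 s.toList 0 0).1 0 (p1 s.toList 0 0).2.1 0).2.2.2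
            = PySem.Int.floordiv ((p1 s.toList 0 0).2.1 + 1) 2 := by omega
        rw [this]
      · intro hD
        have hT1 : 1 ≤ (p1 s.toList 0 0).2.1 := by
          have := hD.2.2
          omega
        intro he
        have : (p2q (p1 s.toList 0 0).1 0 (p1 s.toList 0 0).2.1 0).2.2.2
            = PySem.Int.floordiv ((p1 s.toList 0 0).2.1 + 1) 2 := by
          simpa using he
        omega

-- ===== VERDICT (by name: the statement is the Claim_ definition above) =====
theorem correct_spec : Claim_unchanged_correct := by
  intro s _
  exact (main_core s).1

theorem correct_changed : Claim_changed_correct := by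
  unfold Claim_changed_correct; decide

theorem correct_tight : Claim_exact_correct := by
  intro s _ hD
  exact (main_core s).2 hD
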